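-- pv_equiv track=rewrite | github.com/pytorch/pytorch | pytorch-env/lib/python3.12/site-packages/mpmath/libmp/libmpc.py | complex_int_pow
-- ===== SOURCE A (Python) =====
-- def complex_int_pow(a, b, n):
--     """Complex integer power: computes (a+b*I)**n exactly for
--     nonnegative n (a and b must be Python ints)."""
--     wre = 1
--     wim = 0
--     while n:
--         if n & 1:
--             wre, wim = wre*a - wim*b, wim*a + wre*b
--             n -= 1
--         a, b = a*a - b*b, 2*a*b
--         n //= 2
--     return wre, wim
-- ===== SOURCE B (Python) =====
-- def complex_int_pow(a, b, n):
--     """Complex integer power: computes (a+b*I)**n exactly for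
--     nonnegative n (a and b must be Python ints)."""
--     if n == 0:
--         return 1, 0
--     hr, hi = complex_int_pow(a, b, n // 2)
--     sr, si = hr*hr - hi*hi, 2*hr*hi
--     if n & 1:
--         return sr*a - si*b, si*a + sr*b
--     return sr, si
-- ===== Notes on version B (the rewrite author's own statement) =====
-- stated objective: alternative
-- what changed: Replaces A's iterative accumulate-down bit loop (multiply accumulator by current base on odd bits, squaring the base each step) with top-down divide-and-conquer fast power: recursively compute the n//2 power, square it, and multiply in one extra (a,b) factor when n is odd.
import Mathlib
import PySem

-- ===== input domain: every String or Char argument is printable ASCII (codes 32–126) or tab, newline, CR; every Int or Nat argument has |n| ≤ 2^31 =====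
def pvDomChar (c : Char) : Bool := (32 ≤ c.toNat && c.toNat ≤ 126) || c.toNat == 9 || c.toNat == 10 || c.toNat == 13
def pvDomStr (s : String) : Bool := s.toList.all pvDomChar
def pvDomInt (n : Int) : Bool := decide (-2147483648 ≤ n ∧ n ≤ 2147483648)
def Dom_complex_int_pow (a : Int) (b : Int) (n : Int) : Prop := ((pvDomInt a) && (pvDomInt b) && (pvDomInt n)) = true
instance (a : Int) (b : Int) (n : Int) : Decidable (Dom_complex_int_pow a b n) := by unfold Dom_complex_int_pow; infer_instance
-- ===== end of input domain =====

-- B replaces A's iterative bit loop with top-down recursive divide-and-conquer fast power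
-- (compute the n//2 power, square it, multiply one extra factor when n is odd); alternative structure, same cost.


-- ===== PORT A =====
-- A's while loop, step for step; the Nat fuel only makes the loop total in Lean
-- (n.toNat + 1 steps suffice for every n ≥ 0, i.e. on all of Pre_).
def pyPowLoopA : Nat → Int → Int → Int → Int → Int → Int × Int
  | 0, _, _, _, wre, wim => (wre, wim)
  | fuel+1, a, b, n, wre, wim =>
    if n = 0 then (wre, wim)
    else if PySem.Int.mod n 2 ≠ 0 then
      pyPowLoopA fuel (a*a - b*b) (2*a*b) (PySem.Int.floordiv (n-1) 2) (wre*a - wim*b) (wim*a + wre*b)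
    else
      pyPowLoopA fuel (a*a - b*b) (2*a*b) (PySem.Int.floordiv n 2) wre wim

def complex_int_pow (a : Int) (b : Int) (n : Int) : Int × Int :=
  pyPowLoopA (n.toNat + 1) a b n 1 0

-- ===== PORT B =====
-- B's recursion, step for step; the Nat fuel only makes it total in Lean (enough for every n ≥ 0).
def pyPowRecB : Nat → Int → Int → Int → Int × Int
  | 0, _, _, _ => (1, 0)
  | fuel+1, a, b, n =>
    if n = 0 then (1, 0)
    else
      let p := pyPowRecB fuel a b (PySem.Int.floordiv n 2)
      let sr := p.1*p.1 - p.2*p.2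
      let si := 2*p.1*p.2
      if PySem.Int.mod n 2 ≠ 0 then (sr*a - si*b, si*a + sr*b) else (sr, si)

def complex_int_pow_alt (a : Int) (b : Int) (n : Int) : Int × Int :=
  pyPowRecB (n.toNat + 1) a b n

-- ===== PRECONDITION & SPEC =====
-- Pre_ excludes n < 0, on which Python A loops forever (and Python B exceeds the recursion limit).
def Pre_complex_int_pow (a : Int) (b : Int) (n : Int) : Prop := 0 ≤ n
instance (a : Int) (b : Int) (n : Int) : Decidable (Pre_complex_int_pow a b n) := by unfold Pre_complex_int_pow; infer_instance
def pvWitness_complex_int_pow : Int × Int × Int := (3, -2, 5)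

def Spec_complex_int_pow (a : Int) (b : Int) (n : Int) (out : Int × Int) : Prop := out = complex_int_pow_alt a b n
instance (a : Int) (b : Int) (n : Int) (out : Int × Int) : Decidable (Spec_complex_int_pow a b n out) := by unfold Spec_complex_int_pow; infer_instance

-- ===== CLAIM (what is proved, stated in full; the proofs are below) =====
def Claim_equal_complex_int_pow : Prop := ∀ (a : Int) (b : Int) (n : Int), Dom_complex_int_pow a b n → Pre_complex_int_pow a b n → Spec_complex_int_pow a b n (complex_int_pow a b n)

-- ===== LEMMAS AND PROOFS =====

-- view of a pair as a Gaussian integer; both ports are proved to compute pvG (a,b) ^ n.toNat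
def pvG (p : Int × Int) : GaussianInt := ⟨p.1, p.2⟩

theorem pvG_mul (wre wim a b : Int) :
    pvG (wre*a - wim*b, wim*a + wre*b) = pvG (wre, wim) * pvG (a, b) := by
  simp [pvG, Zsqrtd.ext_iff, Zsqrtd.re_mul, Zsqrtd.im_mul]; constructor <;> ring

theorem pvG_sq (a b : Int) : pvG (a*a - b*b, 2*a*b) = pvG (a, b) * pvG (a, b) := by
  simp [pvG, Zsqrtd.ext_iff, Zsqrtd.re_mul, Zsqrtd.im_mul]; constructor <;> ring

theorem pvLoopA_eq (fuel : Nat) : ∀ (a b n wre wim : Int), 0 ≤ n → n.toNat < fuel →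
    pyPowLoopA fuel a b n wre wim =
      ((pvG (wre, wim) * pvG (a, b) ^ n.toNat).re, (pvG (wre, wim) * pvG (a, b) ^ n.toNat).im) := by
  induction fuel with
  | zero => intro a b n wre wim hn hf; omega
  | succ fuel ih =>
    intro a b n wre wim hn hf
    by_cases h0 : n = 0
    · subst h0; simp [pyPowLoopA, pvG]
    · have h2 : PySem.Int.mod n 2 = n % 2 := PySem.Int.mod_eq_emod_of_pos (by omega)
      by_cases hodd : n % 2 = 1
      · have hfd : PySem.Int.floordiv (n-1) 2 = (n-1) / 2 := PySem.Int.floordiv_eq_ediv_of_pos (by omega)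
        have hrec := ih (a*a - b*b) (2*a*b) ((n-1)/2) (wre*a - wim*b) (wim*a + wre*b)
          (by omega) (by omega)
        have hm : n.toNat = 2 * ((n-1)/2).toNat + 1 := by omega
        have key : pvG (wre*a - wim*b, wim*a + wre*b) * pvG (a*a - b*b, 2*a*b) ^ ((n-1)/2).toNat
            = pvG (wre, wim) * pvG (a, b) ^ n.toNat := by
          rw [pvG_mul, pvG_sq, hm]; ring
        simp only [pyPowLoopA, if_neg h0, h2, hodd, hfd]
        norm_num [hrec, key]
      · have hodd0 : n % 2 = 0 := by omega
        have hfd : PySem.Int.floordiv n 2 = n / 2 := PySem.Int.floordiv_eq_ediv_of_pos (by omega)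
        have hrec := ih (a*a - b*b) (2*a*b) (n/2) wre wim (by omega) (by omega)
        have hm : n.toNat = 2 * (n/2).toNat := by omega
        have key : pvG (wre, wim) * pvG (a*a - b*b, 2*a*b) ^ (n/2).toNat
            = pvG (wre, wim) * pvG (a, b) ^ n.toNat := by
          rw [pvG_sq, hm]; ring
        simp only [pyPowLoopA, if_neg h0, h2, hodd0, hfd]
        norm_num [hrec, key]

theorem pvRecB_eq (fuel : Nat) : ∀ (a b n : Int), 0 ≤ n → n.toNat < fuel →
    pyPowRecB fuel a b n = ((pvG (a, b) ^ n.toNat).re, (pvG (a, b) ^ n.toNat).im) := by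
  induction fuel with
  | zero => intro a b n hn hf; omega
  | succ fuel ih =>
    intro a b n hn hf
    by_cases h0 : n = 0
    · subst h0; simp [pyPowRecB, pvG]
    · have h2 : PySem.Int.mod n 2 = n % 2 := PySem.Int.mod_eq_emod_of_pos (by omega)
      have hfd : PySem.Int.floordiv n 2 = n / 2 := PySem.Int.floordiv_eq_ediv_of_pos (by omega)
      have hrec := ih a b (n/2) (by omega) (by omega)
      set z := pvG (a, b) with hz
      set m := (n/2).toNat with hmdef
      have hsq : pvG ((z^m).re * (z^m).re - (z^m).im * (z^m).im, 2 * (z^m).re * (z^m).im)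
          = z^m * z^m := by
        rw [pvG_sq]; rfl
      by_cases hodd : n % 2 = 1
      · have hm : n.toNat = 2 * m + 1 := by omega
        have key : pvG ((z^m).re*(z^m).re - (z^m).im*(z^m).im, 2*(z^m).re*(z^m).im)
            * pvG (a, b) = z ^ n.toNat := by
          rw [hsq, hm, ← hz]; ring
        have keyp : ((z^m).re*(z^m).re - (z^m).im*(z^m).im) * a - (2*(z^m).re*(z^m).im) * b
              = (z ^ n.toNat).re
            ∧ (2*(z^m).re*(z^m).im) * a + ((z^m).re*(z^m).re - (z^m).im*(z^m).im) * b
              = (z ^ n.toNat).im := by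
          rw [← key, Zsqrtd.re_mul, Zsqrtd.im_mul]
          constructor <;> · simp [pvG]; ring
        simp only [pyPowRecB, if_neg h0, h2, hodd, hfd, hrec]
        norm_num [keyp.1, keyp.2]
      · have hodd0 : n % 2 = 0 := by omega
        have hm : n.toNat = 2 * m := by omega
        have key : pvG ((z^m).re*(z^m).re - (z^m).im*(z^m).im, 2*(z^m).re*(z^m).im)
            = z ^ n.toNat := by rw [hsq, hm]; ring
        have keyp : ((z^m).re*(z^m).re - (z^m).im*(z^m).im) = (z ^ n.toNat).re
            ∧ 2*(z^m).re*(z^m).im = (z ^ n.toNat).im := by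
          rw [← key]; exact ⟨rfl, rfl⟩
        simp only [pyPowRecB, if_neg h0, h2, hodd0, hfd, hrec]
        norm_num [keyp.1, keyp.2]

-- ===== VERDICT (by name: the statement is the Claim_ definition above) =====
theorem complex_int_pow_spec : Claim_equal_complex_int_pow := by
  intro a b n _ hpre
  unfold Spec_complex_int_pow complex_int_pow complex_int_pow_alt
  rw [pvLoopA_eq (n.toNat + 1) a b n 1 0 hpre (by omega),
      pvRecB_eq (n.toNat + 1) a b n hpre (by omega)]
  have h1 : pvG (1, 0) = 1 := rfl
  rw [h1, one_mul]
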